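-- pv_equiv track=rewrite | github.com/guillermomorini/AdventOfCode | year2023/day14/star1.py | get_tilted_column
-- ===== SOURCE A (Python) =====
-- def get_tilted_column(column):
--     for index, character in enumerate(column):
--         if character == 'O':
--             upperIndex = index - 1
--
--             while upperIndex >= 0 and column[upperIndex] == '.':
--                 swap_characters_in_column(upperIndex, upperIndex + 1, column)
--                 upperIndex -= 1
--
--     return column
--
-- def swap_characters_in_column(index1, index2, column):
--     temp = column[index1]
--     column[index1] = column[index2]
--     column[index2] = temp
-- ===== SOURCE B (Python) =====
-- def get_tilted_column(column):
--     free = 0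
--     for index in range(len(column)):
--         character = column[index]
--         if character == 'O':
--             if free < index:
--                 column[free] = 'O'
--                 column[index] = '.'
--             free += 1
--         elif character != '.':
--             free = index + 1
--     return column
-- ===== Notes on version B (the rewrite author's own statement) =====
-- stated objective: alternative
-- what changed: Replaces the per-rock bubble-up inner while loop (repeated adjacent swaps) with a single pass that tracks the next free slot and resets it after every blocking cell.
import Mathlib
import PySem

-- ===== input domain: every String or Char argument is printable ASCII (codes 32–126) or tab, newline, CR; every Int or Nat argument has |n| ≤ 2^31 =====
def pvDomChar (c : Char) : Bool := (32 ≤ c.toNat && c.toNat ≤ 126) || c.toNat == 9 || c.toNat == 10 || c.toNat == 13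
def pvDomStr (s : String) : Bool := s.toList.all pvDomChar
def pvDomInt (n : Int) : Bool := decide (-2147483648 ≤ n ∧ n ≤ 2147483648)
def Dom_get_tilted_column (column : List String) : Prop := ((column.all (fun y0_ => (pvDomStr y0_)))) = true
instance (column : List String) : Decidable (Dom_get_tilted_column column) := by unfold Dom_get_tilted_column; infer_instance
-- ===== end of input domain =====

-- B replaces A's per-rock bubble-up inner while loop with one pass tracking the next
-- free slot (reset after each blocking cell); A and B mutate the Python list in place
-- the same way, the theorems below are about the returned value.

-- ===== PORT A =====
-- swap_characters_in_column: indices are always in range when called (0 ≤ i < j < len),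
-- so List.getD/List.set are exact here.
def pySwap (col : List String) (i j : Nat) : List String :=
  let temp := col.getD i ""
  ((col.set i (col.getD j "")).set j temp)

-- the inner 'while upperIndex >= 0 and column[upperIndex] == "."' loop;
-- the Nat argument is upperIndex + 1 (0 encodes upperIndex = -1, loop exit).
def tiltW : Nat → List String → List String
  | 0, col => col
  | m + 1, col =>
      if col.getD m "" = "." then tiltW m (pySwap col m (m + 1)) else col

def get_tilted_column (column : List String) : List String :=
  (List.range column.length).foldl
    (fun col index => if col.getD index "" = "O" then tiltW index col else col)
    column

-- ===== PORT B =====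
def stepB (st : List String × Nat) (index : Nat) : List String × Nat :=
  let col := st.1
  let free := st.2
  let character := col.getD index ""
  if character = "O" then
    if free < index then ((col.set free "O").set index ".", free + 1)
    else (col, free + 1)
  else if character = "." then (col, free)
  else (col, index + 1)

def get_tilted_column_alt (column : List String) : List String :=
  ((List.range column.length).foldl stepB (column, 0)).1

-- ===== PRECONDITION & SPEC =====
def Spec_get_tilted_column (column : List String) (out : List String) : Prop := out = get_tilted_column_alt column
instance (column : List String) (out : List String) : Decidable (Spec_get_tilted_column column out) := by unfold Spec_get_tilted_column; infer_instance

-- ===== CLAIM (what is proved, stated in full; the proofs are below) =====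
def Claim_equal_get_tilted_column : Prop := ∀ (column : List String), Dom_get_tilted_column column → Spec_get_tilted_column column (get_tilted_column column)

-- ===== LEMMAS AND PROOFS =====

-- getD "O"/"." implies the index is in range (default "" differs)
lemma getD_ne_default_lt {col : List String} {i : Nat} (h : col.getD i "" ≠ "") :
    i < col.length := by
  by_contra hc
  rw [List.getD_eq_getElem?_getD, List.getElem?_eq_none (by omega)] at h
  simp at h

-- the inner while loop, characterised: with a run of "." from f up to m-1 and a
-- non-"." cell just below f, the rock at m rolls exactly to f.
lemma tiltW_spec (f : Nat) : ∀ (m : Nat) (col : List String), f ≤ m →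
    (∀ k, f ≤ k → k < m → col.getD k "" = ".") →
    (f = 0 ∨ col.getD (f - 1) "" ≠ ".") →
    col.getD m "" = "O" →
    tiltW m col = if f < m then (col.set f "O").set m "." else col := by
  intro m
  induction m with
  | zero =>
      intro col hfm _ _ _
      have : f = 0 := by omega
      simp [tiltW, this]
  | succ m' ih =>
      intro col hfm hdots hstop hO
      by_cases hfe : f = m' + 1
      · -- loop guard fails immediately
        have hne : col.getD m' "" ≠ "." := by
          rcases hstop with h0 | h
          · omega
          · simpa [hfe] using h
        simp only [tiltW]
        rw [if_neg hne, if_neg (show ¬ f < m' + 1 by omega)]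
      · have hfle : f ≤ m' := by omega
        have hdot : col.getD m' "" = "." := hdots m' hfle (by omega)
        have hm'lt : m' < col.length := getD_ne_default_lt (by rw [hdot]; decide)
        have hmlt : m' + 1 < col.length := getD_ne_default_lt (by rw [hO]; decide)
        have hswap : pySwap col m' (m' + 1) = (col.set m' "O").set (m' + 1) "." := by
          simp only [pySwap, hdot, hO]
        set col' := (col.set m' "O").set (m' + 1) "." with hcol'
        have hgetm' : col'.getD m' "" = "O" := by
          rw [hcol', List.getD_eq_getElem?_getD, List.getElem?_set_ne (by omega),
              List.getElem?_set_self hm'lt]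
          rfl
        have hih := ih col' hfle
          (fun k hk1 hk2 => by
            have hs : col'.getD k "" = col.getD k "" := by
              rw [hcol', List.getD_eq_getElem?_getD, List.getElem?_set_ne (by omega),
                  List.getElem?_set_ne (by omega), ← List.getD_eq_getElem?_getD]
            rw [hs]; exact hdots k hk1 (by omega))
          (by
            by_cases h0 : f = 0
            · exact Or.inl h0
            · rcases hstop with h0' | h
              · exact Or.inl h0'
              · refine Or.inr ?_
                have hs : col'.getD (f - 1) "" = col.getD (f - 1) "" := by
                  rw [hcol', List.getD_eq_getElem?_getD, List.getElem?_set_ne (by omega),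
                      List.getElem?_set_ne (by omega), ← List.getD_eq_getElem?_getD]
                rw [hs]; exact h)
          hgetm'
        have hstep : tiltW (m' + 1) col = tiltW m' col' := by
          simp only [tiltW]
          rw [if_pos hdot, hswap]
        rw [hstep, hih]
        by_cases hflt : f < m'
        · -- cascading swaps compose: overriding sets collapse
          rw [if_pos hflt, if_pos (show f < m' + 1 by omega)]
          have hcl : col[m']? = some "." := by
            rw [List.getElem?_eq_getElem hm'lt]
            rw [List.getD_eq_getElem?_getD, List.getElem?_eq_getElem hm'lt] at hdot
            simpa using hdot
          apply List.ext_getElem?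
          intro j
          by_cases hj2 : j = m' + 1
          · rw [hj2, List.getElem?_set_ne (by omega), List.getElem?_set_ne (by omega), hcol',
                List.getElem?_set_self (by rw [List.length_set]; omega),
                List.getElem?_set_self (by rw [List.length_set]; omega)]
          · by_cases hj1 : j = m'
            · rw [hj1, List.getElem?_set_self (by simp [hcol']; omega),
                  List.getElem?_set_ne (by omega), List.getElem?_set_ne (by omega), hcl]
            · by_cases hj3 : j = f
              · rw [hj3, List.getElem?_set_ne (by omega),
                    List.getElem?_set_self (by simp [hcol']; omega),
                    List.getElem?_set_ne (by omega),
                    List.getElem?_set_self (by omega)]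
              · rw [List.getElem?_set_ne (show m' ≠ j by omega),
                    List.getElem?_set_ne (show f ≠ j by omega), hcol',
                    List.getElem?_set_ne (show m' + 1 ≠ j by omega),
                    List.getElem?_set_ne (show m' ≠ j by omega),
                    List.getElem?_set_ne (show m' + 1 ≠ j by omega),
                    List.getElem?_set_ne (show f ≠ j by omega)]
        · have hfm' : f = m' := by omega
          rw [if_neg hflt, if_pos (show f < m' + 1 by omega), hcol', hfm']

-- the invariant carried along both folds
lemma fold_invariant (column : List String) : ∀ (n : Nat),
    ((List.range n).foldl
      (fun col index => if col.getD index "" = "O" then tiltW index col else col) column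
      = ((List.range n).foldl stepB (column, 0)).1)
    ∧ ((List.range n).foldl stepB (column, 0)).2 ≤ n
    ∧ (∀ k, ((List.range n).foldl stepB (column, 0)).2 ≤ k → k < n →
        ((List.range n).foldl stepB (column, 0)).1.getD k "" = ".")
    ∧ (((List.range n).foldl stepB (column, 0)).2 = 0 ∨
        ((List.range n).foldl stepB (column, 0)).1.getD
          (((List.range n).foldl stepB (column, 0)).2 - 1) "" ≠ ".") := by
  intro n
  induction n with
  | zero => exact ⟨rfl, Nat.le_refl _, fun k _ h => absurd h (by omega), Or.inl rfl⟩
  | succ n ih =>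
      obtain ⟨heq, hle, hdots, hstop⟩ := ih
      rcases hB : (List.range n).foldl stepB (column, 0) with ⟨col, free⟩
      rw [hB] at heq hle hdots hstop
      dsimp only at heq hle hdots hstop
      rw [List.range_succ, List.foldl_append, List.foldl_append, hB, heq]
      simp only [List.foldl_cons, List.foldl_nil]
      by_cases hO : col.getD n "" = "O"
      · have hts := tiltW_spec free n col hle hdots hstop hO
        have hnlt : n < col.length := getD_ne_default_lt (by rw [hO]; decide)
        by_cases hfn : free < n
        · have hsB : stepB (col, free) n = ((col.set free "O").set n ".", free + 1) := by
            simp only [stepB]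
            rw [if_pos hO, if_pos hfn]
          rw [hsB, if_pos hO, hts, if_pos hfn]
          refine ⟨rfl, by omega, ?_, ?_⟩
          · intro k hk1 hk2
            dsimp only at hk1 ⊢
            by_cases hkn : k = n
            · rw [hkn, List.getD_eq_getElem?_getD,
                  List.getElem?_set_self (by rw [List.length_set]; omega)]
              rfl
            · rw [List.getD_eq_getElem?_getD, List.getElem?_set_ne (by omega),
                  List.getElem?_set_ne (by omega), ← List.getD_eq_getElem?_getD]
              exact hdots k (by omega) (by omega)
          · right
            dsimp only
            have hfr : free + 1 - 1 = free := by omega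
            rw [hfr, List.getD_eq_getElem?_getD, List.getElem?_set_ne (by omega),
                List.getElem?_set_self (by omega)]
            decide
        · have hsB : stepB (col, free) n = (col, free + 1) := by
            simp only [stepB]
            rw [if_pos hO, if_neg hfn]
          have hfe : free = n := by omega
          rw [hsB, if_pos hO, hts, if_neg hfn]
          refine ⟨rfl, by omega, ?_, ?_⟩
          · intro k hk1 hk2
            dsimp only at hk1
            omega
          · right
            dsimp only
            have hfr : free + 1 - 1 = free := by omega
            rw [hfr, hfe, hO]
            decide
      · by_cases hdot : col.getD n "" = "."
        · have hsB : stepB (col, free) n = (col, free) := by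
            simp only [stepB]
            rw [if_neg hO, if_pos hdot]
          rw [hsB, if_neg hO]
          refine ⟨rfl, by omega, ?_, ?_⟩
          · intro k hk1 hk2
            dsimp only at hk1 ⊢
            by_cases hkn : k = n
            · rw [hkn]; exact hdot
            · exact hdots k hk1 (by omega)
          · simpa using hstop
        · have hsB : stepB (col, free) n = (col, n + 1) := by
            simp only [stepB]
            rw [if_neg hO, if_neg hdot]
          rw [hsB, if_neg hO]
          refine ⟨rfl, by omega, ?_, Or.inr ?_⟩
          · intro k hk1 hk2
            dsimp only at hk1
            omega
          · dsimp only
            have hfr : n + 1 - 1 = n := by omega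
            rw [hfr]
            exact hdot

-- ===== VERDICT (by name: the statement is the Claim_ definition above) =====
theorem get_tilted_column_spec : Claim_equal_get_tilted_column := by
  intro column _
  unfold Spec_get_tilted_column get_tilted_column get_tilted_column_alt
  exact (fold_invariant column column.length).1
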